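-- pv_equiv track=rewrite | github.com/RaymanPython/Yandex_lizwy | Основы программирования на языке Python  Д20/Функции как объект. Лямбда-функции/Самая далёкая планета.py | find_farthest_orbit
-- ===== SOURCE A (Python) =====
-- def find_farthest_orbit(orb):
--     sp = []
--     for i in orb:
--         if i[0] != i[1]:
--             sp.append(i[0] * i[1])
--         else:
--             sp.append(-1)
--     ind = sp.index(max(sp))
--     return orb[ind]
-- ===== SOURCE B (Python) =====
-- def find_farthest_orbit(orb):
--     score = lambda i: i[0] * i[1] if i[0] != i[1] else -1
--     return sorted(orb, key=score, reverse=True)[0]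
-- ===== Notes on version B (the rewrite author's own statement) =====
-- stated objective: alternative
-- what changed: Replaces the build-a-score-table / max / index / reindex pipeline with a stable reverse sort by the score and taking the first element; Python's stable descending sort puts the first occurrence of the maximal score at the head, matching A's sp.index(max(sp)) tie-breaking.
import Mathlib
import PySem

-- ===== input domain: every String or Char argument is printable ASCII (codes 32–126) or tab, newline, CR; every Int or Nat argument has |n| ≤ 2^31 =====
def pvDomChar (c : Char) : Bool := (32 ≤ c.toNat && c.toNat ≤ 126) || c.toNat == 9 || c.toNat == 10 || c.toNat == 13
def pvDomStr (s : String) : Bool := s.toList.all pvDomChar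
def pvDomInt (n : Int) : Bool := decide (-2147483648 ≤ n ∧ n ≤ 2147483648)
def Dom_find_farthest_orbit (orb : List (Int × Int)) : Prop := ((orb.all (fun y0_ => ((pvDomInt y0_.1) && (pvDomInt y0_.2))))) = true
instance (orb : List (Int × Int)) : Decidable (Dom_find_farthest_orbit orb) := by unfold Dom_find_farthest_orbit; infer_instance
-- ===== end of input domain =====

-- B replaces A's build-score-table / max-scan / index-scan / reindex pipeline by a stable
-- reverse sort on the per-orbit score and taking the first element (return value only).

-- ===== PORT A =====
def find_farthest_orbit (orb : List (Int × Int)) : Int × Int :=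
  let sp := orb.foldl (fun acc i => if i.1 ≠ i.2 then acc ++ [i.1 * i.2] else acc ++ [-1]) []
  let ind : Nat := (PySem.List.index? sp ((PySem.List.max? sp (fun y => y)).getD 0)).getD 0
  (PySem.List.pyGet? orb (ind : Int)).getD (0, 0)

-- ===== PORT B =====
-- the per-orbit score B's lambda computes
def pvScore (i : Int × Int) : Int := if i.1 ≠ i.2 then i.1 * i.2 else -1

def find_farthest_orbit_alt (orb : List (Int × Int)) : Int × Int :=
  (PySem.List.pyGet? (PySem.List.sorted orb pvScore true) 0).getD (0, 0)

-- ===== PRECONDITION & SPEC =====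
-- Pre_ excludes only the empty list, on which A raises ValueError (max of []) and B raises IndexError ([0] of []).
def Pre_find_farthest_orbit (orb : List (Int × Int)) : Prop := orb ≠ []
instance (orb : List (Int × Int)) : Decidable (Pre_find_farthest_orbit orb) := by unfold Pre_find_farthest_orbit; infer_instance
def pvWitness_find_farthest_orbit : (List (Int × Int)) := [(2, 3), (4, 4), (1, 6)]

def Spec_find_farthest_orbit (orb : List (Int × Int)) (out : Int × Int) : Prop := out = find_farthest_orbit_alt orb
instance (orb : List (Int × Int)) (out : Int × Int) : Decidable (Spec_find_farthest_orbit orb out) := by unfold Spec_find_farthest_orbit; infer_instance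

-- ===== CLAIM (what is proved, stated in full; the proofs are below) =====
def Claim_equal_find_farthest_orbit : Prop := ∀ (orb : List (Int × Int)), Dom_find_farthest_orbit orb → Pre_find_farthest_orbit orb → Spec_find_farthest_orbit orb (find_farthest_orbit orb)

-- ===== LEMMAS AND PROOFS =====

-- the running "keep the first maximum" step, a common characterisation of both programs
def pvStep (b i : Int × Int) : Int × Int := if pvScore b < pvScore i then i else b

lemma pv_sp_eq (l : List (Int × Int)) : ∀ acc,
    l.foldl (fun acc i => if i.1 ≠ i.2 then acc ++ [i.1 * i.2] else acc ++ [-1]) acc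
      = acc ++ l.map pvScore := by
  induction l with
  | nil => intro acc; simp [List.foldl]
  | cons i t ih =>
      intro acc
      have hstep : (if i.1 ≠ i.2 then acc ++ [i.1 * i.2] else acc ++ [-1]) = acc ++ [pvScore i] := by
        unfold pvScore
        by_cases h : i.1 = i.2 <;> simp [h]
      simp only [List.foldl, List.map]
      rw [hstep, ih]
      simp

lemma pv_foldl_max_comm (l : List Int) : ∀ a b, l.foldl max (max a b) = max a (l.foldl max b) := by
  induction l with
  | nil => intro a b; simp
  | cons c t ih =>
      intro a b
      simp only [List.foldl]
      rw [max_assoc, ih]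

lemma pv_no_update (l : List (Int × Int)) : ∀ x, (∀ z ∈ l, pvScore z ≤ pvScore x) →
    l.foldl pvStep x = x := by
  induction l with
  | nil => intro x _; rfl
  | cons z zs ih =>
      intro x h
      have hz : pvScore z ≤ pvScore x := h z (by simp)
      simp only [List.foldl]
      rw [show pvStep x z = x from by unfold pvStep; rw [if_neg (not_lt.mpr hz)]]
      exact ih x (fun w hw => h w (by simp [hw]))

lemma pv_seed_irr (l : List (Int × Int)) : ∀ a b,
    (∃ z ∈ l, pvScore a < pvScore z) → (∃ z ∈ l, pvScore b < pvScore z) →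
    l.foldl pvStep a = l.foldl pvStep b := by
  induction l with
  | nil => intro a b ha _; exact absurd ha (by simp)
  | cons z zs ih =>
      intro a b ha hb
      simp only [List.foldl]
      by_cases haz : pvScore a < pvScore z
      · by_cases hbz : pvScore b < pvScore z
        · rw [show pvStep a z = z from by unfold pvStep; rw [if_pos haz],
              show pvStep b z = z from by unfold pvStep; rw [if_pos hbz]]
        · obtain ⟨w, hw, hbw⟩ := hb
          rcases List.mem_cons.mp hw with rfl | hwzs
          · exact absurd hbw hbz
          · rw [show pvStep a z = z from by unfold pvStep; rw [if_pos haz],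
                show pvStep b z = b from by unfold pvStep; rw [if_neg hbz]]
            exact ih z b ⟨w, hwzs, lt_of_le_of_lt (not_lt.mp hbz) hbw⟩ ⟨w, hwzs, hbw⟩
      · by_cases hbz : pvScore b < pvScore z
        · obtain ⟨w, hw, haw⟩ := ha
          rcases List.mem_cons.mp hw with rfl | hwzs
          · exact absurd haw haz
          · rw [show pvStep a z = a from by unfold pvStep; rw [if_neg haz],
                show pvStep b z = z from by unfold pvStep; rw [if_pos hbz]]
            exact ih a z ⟨w, hwzs, haw⟩ ⟨w, hwzs, lt_of_le_of_lt (not_lt.mp haz) haw⟩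
        · obtain ⟨w, hw, haw⟩ := ha
          obtain ⟨w', hw', hbw⟩ := hb
          rcases List.mem_cons.mp hw with rfl | hwzs
          · exact absurd haw haz
          rcases List.mem_cons.mp hw' with rfl | hwzs'
          · exact absurd hbw hbz
          rw [show pvStep a z = a from by unfold pvStep; rw [if_neg haz],
              show pvStep b z = b from by unfold pvStep; rw [if_neg hbz]]
          exact ih a b ⟨w, hwzs, haw⟩ ⟨w', hwzs', hbw⟩

-- head of a stable descending insertion is the running-first-max step
lemma pv_head_insertBy (acc : List (Int × Int)) (z : Int × Int) :
    (PySem.List.insertBy (fun a b => decide (pvScore b < pvScore a)) z acc).head?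
      = some (match acc.head? with | none => z | some y => pvStep y z) := by
  cases acc with
  | nil => rfl
  | cons y ys =>
      unfold PySem.List.insertBy pvStep
      by_cases h : pvScore y < pvScore z
      · simp [h]
      · simp [h]

lemma pv_head_foldl_insertBy (t : List (Int × Int)) : ∀ (acc : List (Int × Int)) (h : Int × Int),
    acc.head? = some h →
    (t.foldl (fun acc x => PySem.List.insertBy (fun a b => decide (pvScore b < pvScore a)) x acc) acc).head?
      = some (t.foldl pvStep h) := by
  induction t with
  | nil => intro acc h hh; simpa using hh
  | cons z zs ih =>
      intro acc h hh
      simp only [List.foldl]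
      refine ih _ (pvStep h z) ?_
      rw [pv_head_insertBy, hh]

lemma pv_alt_cons (xs : List (Int × Int)) (x : Int × Int) :
    find_farthest_orbit_alt (x :: xs) = xs.foldl pvStep x := by
  unfold find_farthest_orbit_alt
  have hs := PySem.List.sorted_rev_eq_foldl_insertBy (x :: xs) pvScore
  have hh : (PySem.List.sorted (x :: xs) pvScore true).head? = some (xs.foldl pvStep x) := by
    rw [hs]
    simp only [List.foldl]
    exact pv_head_foldl_insertBy xs
      (PySem.List.insertBy (fun a b => decide (pvScore b < pvScore a)) x []) x rfl
  cases hsl : PySem.List.sorted (x :: xs) pvScore true with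
  | nil => rw [hsl] at hh; exact absurd hh (by simp)
  | cons m rest =>
      rw [hsl] at hh
      simp only [List.head?] at hh
      show (PySem.List.pyGet? (m :: rest) 0).getD (0, 0) = _
      rw [PySem.List.pyGet?_zero_cons, Option.getD_some]
      exact (Option.some.injEq _ _).mp hh

lemma pv_A_cons (xs : List (Int × Int)) : ∀ x,
    find_farthest_orbit (x :: xs) = xs.foldl pvStep x := by
  induction xs with
  | nil =>
      intro x
      unfold find_farthest_orbit
      simp only [pv_sp_eq, List.nil_append, List.map]
      rw [PySem.List.max?_id_cons]
      simp only [List.foldl, Option.getD_some]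
      rw [PySem.List.index?_cons_self]
      simp
  | cons y ys ih =>
      intro x
      set N : Int := List.foldl max (pvScore y) (List.map pvScore ys) with hN
      have hNle : ∀ z ∈ y :: ys, pvScore z ≤ N := by
        intro z hz
        rcases List.mem_cons.mp hz with rfl | hzys
        · exact (PySem.List.le_foldl_max (List.map pvScore ys) (pvScore z)).1
        · exact (PySem.List.le_foldl_max (List.map pvScore ys) (pvScore y)).2 _
            (List.mem_map_of_mem hzys)
      have hmax : List.foldl max (pvScore x) (List.map pvScore (y :: ys)) = max (pvScore x) N := by
        rw [hN]
        show List.foldl max (pvScore x) (pvScore y :: List.map pvScore ys) = _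
        rw [List.foldl_cons]
        exact pv_foldl_max_comm (List.map pvScore ys) (pvScore x) (pvScore y)
      unfold find_farthest_orbit
      simp only [pv_sp_eq, List.nil_append]
      rw [show List.map pvScore (x :: y :: ys) = pvScore x :: List.map pvScore (y :: ys) from rfl,
          PySem.List.max?_id_cons, Option.getD_some, hmax]
      by_cases hc : N ≤ pvScore x
      · rw [max_eq_left hc, PySem.List.index?_cons_self, Option.getD_some, Nat.cast_zero,
            PySem.List.pyGet?_zero_cons, Option.getD_some]
        exact (pv_no_update (y :: ys) x (fun z hz => le_trans (hNle z hz) hc)).symm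
      · have hclt : pvScore x < N := not_le.mp hc
        rw [max_eq_right (le_of_lt hclt)]
        have hNmem : N ∈ List.map pvScore (y :: ys) := by
          rw [hN]
          rcases PySem.List.foldl_max_mem (List.map pvScore ys) (pvScore y) with h | h
          · rw [h]; simp
          · rw [List.map_cons]; exact List.mem_cons_of_mem _ h
        obtain ⟨k, hk⟩ := Option.isSome_iff_exists.mp
          ((PySem.List.index?_isSome_iff (List.map pvScore (y :: ys)) N).mpr hNmem)
        rw [PySem.List.index?_cons_of_ne _ (ne_of_lt hclt), hk]
        simp only [Option.map_some, Option.getD_some]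
        rw [show ((k + 1 : Nat) : Int) = ((k : Nat) : Int) + 1 from by push_cast; ring,
            PySem.List.pyGet?_cons_succ]
        have hA : find_farthest_orbit (y :: ys) = (PySem.List.pyGet? (y :: ys) (k : Int)).getD (0, 0) := by
          unfold find_farthest_orbit
          simp only [pv_sp_eq, List.nil_append]
          rw [show List.map pvScore (y :: ys) = pvScore y :: List.map pvScore ys from rfl,
              PySem.List.max?_id_cons, Option.getD_some, ← hN]
          have hk' : PySem.List.index? (pvScore y :: List.map pvScore ys) N = some k := hk
          rw [hk', Option.getD_some]
        rw [← hA, ih y, List.foldl_cons]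
        by_cases hxy : pvScore x < pvScore y
        · rw [show pvStep x y = y from by unfold pvStep; rw [if_pos hxy]]
        · rw [show pvStep x y = x from by unfold pvStep; rw [if_neg hxy]]
          have hmem2 : N ∈ List.map pvScore ys := by
            rcases PySem.List.foldl_max_mem (List.map pvScore ys) (pvScore y) with h | h
            · exfalso
              have h2 : N = pvScore y := by rw [hN, h]
              have h1 : pvScore y ≤ pvScore x := not_lt.mp hxy
              linarith
            · rw [hN]; exact h
          obtain ⟨w, hw, hweq⟩ := List.mem_map.mp hmem2
          exact pv_seed_irr ys y x
            ⟨w, hw, by rw [hweq]; exact lt_of_le_of_lt (not_lt.mp hxy) hclt⟩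
            ⟨w, hw, by rw [hweq]; exact hclt⟩

-- ===== VERDICT (by name: the statement is the Claim_ definition above) =====
theorem find_farthest_orbit_spec : Claim_equal_find_farthest_orbit := by
  intro orb _hdom hpre
  unfold Spec_find_farthest_orbit
  cases orb with
  | nil => exact absurd rfl hpre
  | cons x xs => rw [pv_A_cons xs x, pv_alt_cons xs x]
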